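-- pv_equiv track=rewrite | github.com/NicoDemaria/CollegePython | Unit05/Ficha 15 - [Arreglos - Casos de Estudio II]/Fuentes/[F15] Arreglos/test04.py | code_transposition
-- ===== SOURCE A (Python) =====
-- def is_ok(cad, ABC):
--     if cad is None:
--         return False
--
--     if cad == '':
--         return False
--
--     for i in range(len(cad)):
--         # si cad[i] no es blanco y no está en el alfabeto, retornar False...
--         if cad[i] != ' ' and ABC.find(cad[i]) == -1:
--             return False
--
--     return True
--
-- def code_transposition(mens, ABC, TRANS):
--     if not is_ok(mens, ABC):
--         return None
--
--     b = []
--     for i in range(len(mens)):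
--         # si el caracter original es blanco, dejar ese blanco...
--         if mens[i] == ' ':
--             b.append(' ')
--
--         else:
--             # si el caracter original no es blanco, reemplazarlo...
--             im = ABC.find(mens[i])
--             b.append(TRANS[im])
--
--     # convertir el arreglo b a cadena de caracteres y retornar...
--     encr = ''.join(b)
--     return encr
-- ===== SOURCE B (Python) =====
-- def code_transposition(mens, ABC, TRANS):
--     # build the first-occurrence substitution table once, then map in one pass
--     if not mens:
--         return None
--     table = {' ': ' '}
--     for a, t in zip(ABC, TRANS):
--         table.setdefault(a, t)
--     out = []
--     for ch in mens:
--         if ch not in table: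
--             return None
--         out.append(table[ch])
--     return ''.join(out)
-- ===== Notes on version B (the rewrite author's own statement) =====
-- stated objective: faster
-- what changed: Replaces A's two full scans (is_ok validation pass, then a mapping pass with a linear ABC.find per character) by a substitution dict built once from zip(ABC, TRANS) and a single short-circuiting mapping pass; the inner ABC scan disappears. Pre_ excludes only the inputs where A raises IndexError (all characters valid but a mapped index >= len(TRANS)); B returns None there.
import Mathlib
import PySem

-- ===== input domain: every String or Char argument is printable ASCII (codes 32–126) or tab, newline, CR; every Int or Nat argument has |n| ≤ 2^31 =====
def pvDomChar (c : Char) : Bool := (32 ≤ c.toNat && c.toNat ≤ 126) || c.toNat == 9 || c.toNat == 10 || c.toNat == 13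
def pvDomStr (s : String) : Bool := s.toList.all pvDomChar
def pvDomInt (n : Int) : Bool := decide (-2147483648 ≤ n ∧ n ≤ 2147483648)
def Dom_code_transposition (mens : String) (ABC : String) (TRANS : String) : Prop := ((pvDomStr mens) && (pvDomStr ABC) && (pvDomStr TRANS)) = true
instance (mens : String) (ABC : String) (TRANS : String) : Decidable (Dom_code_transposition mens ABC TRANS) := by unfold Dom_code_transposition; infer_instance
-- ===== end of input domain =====

-- B builds the substitution table once from zip(ABC, TRANS) and maps mens in a single
-- short-circuiting pass, dropping A's is_ok pre-scan and the per-character ABC.find scan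
-- (objective: faster — measurably so in a timing run).

-- ===== PORT A =====
-- is_ok(cad, ABC); 'cad is None' is unrepresentable for a Lean String, so only the '' check remains.
-- The loop early-returns False, which List.all's short-circuit mirrors exactly.
def pv_is_ok (cad : String) (ABC : String) : Bool :=
  if cad.toList = [] then false
  else cad.toList.all (fun c => !(c != ' ' && (PySem.Chars.find ABC.toList [c] == -1)))

def code_transposition (mens : String) (ABC : String) (TRANS : String) : Option String :=
  if !pv_is_ok mens ABC then none
  else
    -- TRANS[im] via pyGetD: exact under Pre_ (Python raises IndexError when im ≥ len(TRANS))
    let b := mens.toList.map (fun c =>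
      if c = ' ' then ' '
      else PySem.List.pyGetD TRANS.toList (PySem.Chars.find ABC.toList [c]) ' ')
    some (String.ofList b)

-- ===== PORT B =====
-- table = {' ': ' '}; for a, t in zip(ABC, TRANS): table.setdefault(a, t)
def pvTable (ABC : List Char) (TRANS : List Char) : PySem.Dict Char Char :=
  (ABC.zip TRANS).foldl (fun d p => d.setdefault p.1 p.2) (PySem.Dict.ofList [(' ', ' ')])

-- the single mapping pass: 'if ch not in table: return None; out.append(table[ch])'
def altGo (d : PySem.Dict Char Char) : List Char → Option (List Char)
  | [] => some []
  | c :: rest =>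
    match d.get? c with
    | none => none
    | some t => (altGo d rest).map (fun l => t :: l)

def code_transposition_alt (mens : String) (ABC : String) (TRANS : String) : Option String :=
  if mens.toList = [] then none
  else (altGo (pvTable ABC.toList TRANS.toList) mens.toList).map String.ofList

-- ===== PRECONDITION & SPEC =====
-- pvBad: mens is nonempty, every character is a space or in ABC, and some non-space
-- character's first ABC index is ≥ len(TRANS) — exactly where Python A raises IndexError.
def pvBad (mens : String) (ABC : String) (TRANS : String) : Bool :=
  !mens.toList.isEmpty &&
    mens.toList.all (fun c => c == ' ' || ABC.toList.contains c) &&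
    mens.toList.any (fun c => c != ' ' && decide (TRANS.toList.length ≤ ABC.toList.idxOf c))

-- Pre_ excludes exactly the inputs on which Python A RAISES (IndexError), i.e. pvBad.
def Pre_code_transposition (mens : String) (ABC : String) (TRANS : String) : Prop :=
  pvBad mens ABC TRANS = false
instance (mens : String) (ABC : String) (TRANS : String) : Decidable (Pre_code_transposition mens ABC TRANS) := by unfold Pre_code_transposition; infer_instance

def pvWitness_code_transposition : String × String × String := ("ab c", "abc", "xyz")


def Spec_code_transposition (mens : String) (ABC : String) (TRANS : String) (out : Option String) : Prop := out = code_transposition_alt mens ABC TRANS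
instance (mens : String) (ABC : String) (TRANS : String) (out : Option String) : Decidable (Spec_code_transposition mens ABC TRANS out) := by unfold Spec_code_transposition; infer_instance

-- ===== CLAIM (what is proved, stated in full; the proofs are below) =====
def Claim_equal_code_transposition : Prop := ∀ (mens : String) (ABC : String) (TRANS : String), Dom_code_transposition mens ABC TRANS → Pre_code_transposition mens ABC TRANS → Spec_code_transposition mens ABC TRANS (code_transposition mens ABC TRANS)

-- ===== LEMMAS AND PROOFS =====

-- pvBad in propositional form
lemma pvBad_iff (mens ABC TRANS : String) :
    pvBad mens ABC TRANS = true ↔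
      (mens.toList ≠ [] ∧ (∀ c ∈ mens.toList, c = ' ' ∨ c ∈ ABC.toList) ∧
        (∃ c ∈ mens.toList, c ≠ ' ' ∧ TRANS.toList.length ≤ ABC.toList.idxOf c)) := by
  simp [pvBad, List.all_eq_true, List.any_eq_true, and_assoc]

-- ABC.find(c) for a single character is the first index of c, or -1.
lemma find_go_single (c : Char) (s : List Char) (k : Nat) :
    PySem.Chars.find.go [c] s k =
      if c ∈ s then ((k + s.idxOf c : Nat) : Int) else -1 := by
  induction s generalizing k with
  | nil => simp [PySem.Chars.find.go]
  | cons a t ih =>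
    by_cases h : a = c
    · subst h; simp [PySem.Chars.find.go, List.isPrefixOf, List.idxOf_cons_self]
    · have hpre : [c].isPrefixOf (a :: t) = false := by
        simp [List.isPrefixOf]; exact fun hc => (h hc.symm).elim
      have hidx : (a :: t).idxOf c = t.idxOf c + 1 := by
        simp [List.idxOf_cons, beq_false_of_ne h]
      have hmem : c ∈ a :: t ↔ c ∈ t := by
        simp [List.mem_cons]; intro hc; exact (h hc.symm).elim
      rw [PySem.Chars.find.go, hpre]
      simp only [Bool.false_eq_true, if_false, ih (k + 1), hidx, hmem]
      split_ifs with hm <;> [push_cast; skip] <;> ring_nf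

lemma find_single (c : Char) (s : List Char) :
    PySem.Chars.find s [c] = if c ∈ s then ((s.idxOf c : Nat) : Int) else -1 := by
  rw [PySem.Chars.find, find_go_single]; simp

-- looking up in a setdefault-fold: an existing binding survives; otherwise the first matching pair.
lemma get?_setdefault_foldl (ps : List (Char × Char)) (d : PySem.Dict Char Char) (c : Char) :
    (ps.foldl (fun d p => d.setdefault p.1 p.2) d).get? c =
      match d.get? c with
      | some v => some v
      | none => (ps.find? (fun p => p.1 == c)).map (fun p => p.2) := by
  induction ps generalizing d with
  | nil => cases h : d.get? c <;> simp [h]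
  | cons p ps ih =>
    have hsd : d.setdefault p.1 p.2 = if d.contains p.1 then d else d.insert p.1 p.2 := by
      by_cases h : d.contains p.1 = true
      · simp [PySem.Dict.setdefault, h]
      · apply PySem.Dict.ext
        rw [if_neg h, PySem.Dict.items_insert_of_not_contains d p.2 (by simpa using h)]
        simp [PySem.Dict.setdefault, h]
    rw [List.foldl_cons, ih]
    by_cases hpc : p.1 = c
    · subst hpc
      cases hv : d.get? p.1 with
      | some v =>
        have hcont : d.contains p.1 = true := by
          by_contra hcc
          have := (PySem.Dict.get?_eq_none_iff_contains d p.1).2 (by simpa using hcc)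
          rw [hv] at this; cases this
        rw [hsd, if_pos hcont, hv]
      | none =>
        have hcont : d.contains p.1 = false :=
          (PySem.Dict.get?_eq_none_iff_contains d p.1).1 hv
        rw [hsd, if_neg (by simp [hcont]), PySem.Dict.get?_insert_self]
        simp
    · have hget : (if d.contains p.1 then d else d.insert p.1 p.2).get? c = d.get? c := by
        split_ifs with h
        · rfl
        · exact PySem.Dict.get?_insert_of_ne d p.2 (Ne.symm hpc)
      rw [hsd, hget, List.find?_cons_of_neg (by simpa using hpc)]

-- first match in zip(ABC, TRANS) ↔ first index of c in ABC, provided it is below len(TRANS).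
lemma find?_zip_eq (ABC TRANS : List Char) (c : Char) :
    ((ABC.zip TRANS).find? (fun p => p.1 == c)).map (fun p => p.2) =
      if c ∈ ABC ∧ ABC.idxOf c < TRANS.length
      then some (TRANS.getD (ABC.idxOf c) ' ') else none := by
  induction ABC generalizing TRANS with
  | nil => simp
  | cons a as ih =>
    cases TRANS with
    | nil => simp
    | cons t ts =>
      by_cases hac : a = c
      · subst hac
        simp [List.zip_cons_cons, List.idxOf_cons_self]
      · have hidx : (a :: as).idxOf c = as.idxOf c + 1 := by
          simp [List.idxOf_cons, beq_false_of_ne hac]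
        have hmem : c ∈ a :: as ↔ c ∈ as := by
          simp [List.mem_cons]; intro hc; exact (hac hc.symm).elim
        rw [List.zip_cons_cons, List.find?_cons_of_neg (by simpa using hac)]
        simp only [ih ts, hidx, hmem, List.length_cons, Nat.add_lt_add_iff_right]
        rfl

-- table lookup characterised by ABC.find and len(TRANS)
lemma table_get (ABC TRANS : List Char) (c : Char) (hc : c ≠ ' ') :
    (pvTable ABC TRANS).get? c =
      if c ∈ ABC ∧ ABC.idxOf c < TRANS.length
      then some (TRANS.getD (ABC.idxOf c) ' ') else none := by
  rw [pvTable, get?_setdefault_foldl]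
  have h0 : (PySem.Dict.ofList [((' ' : Char), (' ' : Char))]).get? c = none := by
    show (PySem.Dict.mk [(' ', ' ')]).get? c = none
    rw [PySem.Dict.get?_mk_cons]
    simp [beq_false_of_ne (Ne.symm hc), PySem.Dict.get?]
  rw [h0, find?_zip_eq]

lemma table_get_space (ABC TRANS : List Char) :
    (pvTable ABC TRANS).get? ' ' = some ' ' := by
  rw [pvTable, get?_setdefault_foldl]
  rfl

-- the single pass equals "all lookups succeed, then map the lookups"
lemma altGo_eq (d : PySem.Dict Char Char) (l : List Char) :
    altGo d l =
      if l.all (fun c => (d.get? c).isSome)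
      then some (l.map (fun c => (d.get? c).getD ' ')) else none := by
  induction l with
  | nil => simp [altGo]
  | cons c rest ih =>
    cases hv : d.get? c with
    | none => simp [altGo, hv]
    | some t =>
      cases h : rest.all (fun c => (d.get? c).isSome) <;>
        simp [altGo, hv, ih, h]

-- ===== VERDICT (by name: the statement is the Claim_ definition above) =====
theorem code_transposition_spec : Claim_equal_code_transposition := by
  intro mens ABC TRANS _ hpre
  have hpre' : ¬ (mens.toList ≠ [] ∧ (∀ c ∈ mens.toList, c = ' ' ∨ c ∈ ABC.toList) ∧
      (∃ c ∈ mens.toList, c ≠ ' ' ∧ TRANS.toList.length ≤ ABC.toList.idxOf c)) := by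
    rw [← pvBad_iff, Pre_code_transposition] at *
    simp [hpre]
  unfold Spec_code_transposition code_transposition code_transposition_alt pv_is_ok
  by_cases hnil : mens.toList = []
  · simp [hnil]
  · rw [altGo_eq]
    by_cases hok : ∀ c ∈ mens.toList, c = ' ' ∨ c ∈ ABC.toList
    · -- A's validation passes; Pre_ rules out an out-of-range TRANS index
      have hbound : ∀ c ∈ mens.toList, c ≠ ' ' → ABC.toList.idxOf c < TRANS.toList.length := by
        intro c hc hcs
        by_contra hge
        exact hpre' ⟨hnil, hok, c, hc, hcs, le_of_not_gt hge⟩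
      have hA : (mens.toList.all
          (fun c => !(c != ' ' && (PySem.Chars.find ABC.toList [c] == -1)))) = true := by
        rw [List.all_eq_true]
        intro c hc
        rcases hok c hc with h | h
        · simp [h]
        · simp [find_single, h]
      have hB : (mens.toList.all
          (fun c => ((pvTable ABC.toList TRANS.toList).get? c).isSome)) = true := by
        rw [List.all_eq_true]
        intro c hc
        by_cases hcs : c = ' '
        · simp [hcs, table_get_space]
        · rcases hok c hc with h | h
          · exact absurd h hcs
          · simp [table_get _ _ _ hcs, h]
            simpa using hbound c hc hcs
      have hmap : mens.toList.map (fun c =>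
            if c = ' ' then ' '
            else PySem.List.pyGetD TRANS.toList (PySem.Chars.find ABC.toList [c]) ' ') =
          mens.toList.map (fun c =>
            ((pvTable ABC.toList TRANS.toList).get? c).getD ' ') := by
        apply List.map_congr_left
        intro c hc
        by_cases hcs : c = ' '
        · simp [hcs, table_get_space]
        · rcases hok c hc with h | h
          · exact absurd h hcs
          · have hidx := hbound c hc hcs
            rw [if_neg hcs, table_get _ _ _ hcs, if_pos ⟨h, hidx⟩, find_single,
              if_pos h, PySem.List.pyGetD_natCast]
            simp [List.getD]
      rw [hA, hB, hmap]
      simp [hnil]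
    · -- some character invalid: A's is_ok fails and B's pass hits a missing key
      push_neg at hok
      obtain ⟨c, hc, hcs, hcab⟩ := hok
      have hA : (mens.toList.all
          (fun c => !(c != ' ' && (PySem.Chars.find ABC.toList [c] == -1)))) = false := by
        rw [List.all_eq_false]
        refine ⟨c, hc, ?_⟩
        simp [hcs, find_single, hcab]
      have hB : (mens.toList.all
          (fun c => ((pvTable ABC.toList TRANS.toList).get? c).isSome)) = false := by
        rw [List.all_eq_false]
        refine ⟨c, hc, ?_⟩
        simp [table_get _ _ _ hcs, hcab]
      rw [hA, hB]
      simp [hnil]
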